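-- pv_equiv track=rewrite | github.com/crow2678/Digital-Twin | productivity_enhanced_twin_optimized_full.py | _smart_chunk_content
-- ===== SOURCE A (Python) =====
-- def _smart_chunk_content(content: str, max_chunk: int = 3500) -> str:
--     """Intelligent content chunking preserving context"""
--     if len(content) <= max_chunk:
--         return content
--
--     # Try to break at natural boundaries
--     paragraphs = content.split('\n\n')
--     result = ""
--
--     for para in paragraphs:
--         if len(result + para) > max_chunk:
--             break
--         result += para + "\n\n"
--
--     # If no good break point, take first max_chunk chars with sentence boundary
--     if len(result) < max_chunk // 2:
--         sentences = content[:max_chunk].split('. ')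
--         result = '. '.join(sentences[:-1]) + '.'
--
--     return result
-- ===== SOURCE B (Python) =====
-- def _smart_chunk_content(content: str, max_chunk: int = 3500) -> str:
--     if len(content) <= max_chunk:
--         return content
--     # one char-level scan for the start positions of the non-overlapping '\n\n' separators
--     seps = []
--     i = 0
--     n = len(content)
--     while i + 1 < n:
--         if content[i] == '\n' and content[i + 1] == '\n':
--             seps.append(i)
--             i += 2
--         else:
--             i += 1
--     # keeping whole paragraphs means cutting at a separator start; positions are increasing,
--     # so the kept prefix ends at the last separator position <= max_chunk (-1 if none)
--     cut = -1
--     for p in seps: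
--         if p <= max_chunk:
--             cut = p
--     result = '' if cut < 0 else content[:cut] + '\n\n'
--     total = 0 if cut < 0 else cut + 2
--     if total < max_chunk // 2:
--         sentences = content[:max_chunk].split('. ')
--         result = '. '.join(sentences[:-1]) + '.'
--     return result
-- ===== Notes on version B (the rewrite author's own statement) =====
-- stated objective: alternative
-- what changed: B never builds the paragraph list: one character-level scan collects the start positions of the non-overlapping blank-line separators, the cut point is the last such position not exceeding max_chunk (positions are increasing, so this equals A's greedy break point), and the result is a direct slice of content up to the cut plus the separator; the sentence fallback is kept identical.
import Mathlib
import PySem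

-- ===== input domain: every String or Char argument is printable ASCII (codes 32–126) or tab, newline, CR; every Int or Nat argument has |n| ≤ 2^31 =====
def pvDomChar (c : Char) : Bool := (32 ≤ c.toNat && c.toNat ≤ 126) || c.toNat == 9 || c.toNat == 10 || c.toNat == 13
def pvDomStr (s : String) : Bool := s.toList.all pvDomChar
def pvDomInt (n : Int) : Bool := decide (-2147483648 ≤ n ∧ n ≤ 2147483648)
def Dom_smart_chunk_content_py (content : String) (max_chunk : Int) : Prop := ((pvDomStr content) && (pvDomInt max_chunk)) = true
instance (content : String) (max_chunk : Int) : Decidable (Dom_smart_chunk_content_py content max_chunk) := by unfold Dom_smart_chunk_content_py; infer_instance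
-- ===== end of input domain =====

-- B drops the paragraph split/join: one character scan collects the '\n\n' separator start
-- positions, the cut point is the last position ≤ max_chunk, and the kept part is the slice
-- content[:cut] + '\n\n' (objective: alternative algorithmic decomposition; same cost).


-- ===== PORT A =====
-- 'for para in paragraphs: if len(result + para) > max_chunk: break; result += para + "\n\n"'
def chunkLoopA (max_chunk : Int) : List (List Char) → List Char → List Char
  | [], result => result
  | para :: rest, result =>
    if max_chunk < PySem.Chars.len (result ++ para) then result
    else chunkLoopA max_chunk rest (result ++ para ++ ['\n', '\n'])

def smart_chunk_content_py (content : String) (max_chunk : Int) : String :=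
  let cs := content.toList
  if PySem.Chars.len cs ≤ max_chunk then content
  else
    let paragraphs := PySem.Chars.splitOn cs ['\n', '\n']
    let result := chunkLoopA max_chunk paragraphs []
    if PySem.Chars.len result < PySem.Int.floordiv max_chunk 2 then
      let sentences := PySem.Chars.splitOn (PySem.Chars.slice cs none (some max_chunk)) ['.', ' ']
      String.ofList (PySem.Chars.join ['.', ' '] (PySem.List.slice sentences none (some (-1))) ++ ['.'])
    else String.ofList result

-- ===== PORT B =====
-- 'while i + 1 < n: if content[i] == "\n" and content[i+1] == "\n": seps.append(i); i += 2 else: i += 1'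
def sepScanB : List Char → Nat → List Nat
  | c1 :: c2 :: rest, i =>
    if c1 = '\n' ∧ c2 = '\n' then i :: sepScanB rest (i + 2)
    else sepScanB (c2 :: rest) (i + 1)
  | _, _ => []

def smart_chunk_content_py_alt (content : String) (max_chunk : Int) : String :=
  let cs := content.toList
  if PySem.Chars.len cs ≤ max_chunk then content
  else
    let seps := sepScanB cs 0
    -- 'cut = -1; for p in seps: if p <= max_chunk: cut = p'
    let cut := seps.foldl (fun c p => if (p : Int) ≤ max_chunk then (p : Int) else c) (-1)
    let result := if cut < 0 then [] else PySem.Chars.slice cs none (some cut) ++ ['\n', '\n']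
    let total : Int := if cut < 0 then 0 else cut + 2
    if total < PySem.Int.floordiv max_chunk 2 then
      let sentences := PySem.Chars.splitOn (PySem.Chars.slice cs none (some max_chunk)) ['.', ' ']
      String.ofList (PySem.Chars.join ['.', ' '] (PySem.List.slice sentences none (some (-1))) ++ ['.'])
    else String.ofList result

-- ===== PRECONDITION & SPEC =====
def Spec_smart_chunk_content_py (content : String) (max_chunk : Int) (out : String) : Prop := out = smart_chunk_content_py_alt content max_chunk
instance (content : String) (max_chunk : Int) (out : String) : Decidable (Spec_smart_chunk_content_py content max_chunk out) := by unfold Spec_smart_chunk_content_py; infer_instance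

-- ===== CLAIM (what is proved, stated in full; the proofs are below) =====
def Claim_equal_smart_chunk_content_py : Prop := ∀ (content : String) (max_chunk : Int), Dom_smart_chunk_content_py content max_chunk → Spec_smart_chunk_content_py content max_chunk (smart_chunk_content_py content max_chunk)

-- ===== LEMMAS AND PROOFS =====

-- structural reformulation of PySem's splitOn on the separator ['\n','\n']
def spSplit (pre : List Char) : List Char → List (List Char)
  | c1 :: c2 :: r =>
    if c1 = '\n' ∧ c2 = '\n' then pre :: spSplit [] r
    else spSplit (pre ++ [c1]) (c2 :: r)
  | [c] => [pre ++ [c]]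
  | [] => [pre]

theorem go_eq_spSplit (fuel : Nat) : ∀ (cs cur : List Char) (acc : List (List Char)),
    cs.length < fuel →
    PySem.Chars.splitOn.go ['\n', '\n'] fuel cs cur acc = acc.reverse ++ spSplit cur.reverse cs := by
  induction fuel with
  | zero => intro cs cur acc h; simp at h
  | succ fuel ih =>
    intro cs cur acc h
    match cs with
    | [] => rw [PySem.Chars.splitOn.go.eq_def]; simp [spSplit]
    | [c] =>
      have hpf : List.isPrefixOf ['\n', '\n'] [c] = false := by
        simp [List.isPrefixOf]
      rw [PySem.Chars.splitOn.go.eq_def]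
      simp only [hpf, Bool.false_eq_true, if_false]
      rw [ih [] (c :: cur) acc (by simp at h ⊢; omega)]
      simp [spSplit]
    | c1 :: c2 :: r =>
      by_cases hc : c1 = '\n' ∧ c2 = '\n'
      · have hpf : List.isPrefixOf ['\n', '\n'] (c1 :: c2 :: r) = true := by
          simp [List.isPrefixOf, hc.1, hc.2]
        rw [PySem.Chars.splitOn.go.eq_def]
        simp only [hpf, if_true]
        rw [show List.drop (['\n', '\n'] : List Char).length (c1 :: c2 :: r) = r by simp]
        rw [ih r [] (cur.reverse :: acc) (by simp at h ⊢; omega)]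
        simp [spSplit, hc.1, hc.2]
      · have hpf : List.isPrefixOf ['\n', '\n'] (c1 :: c2 :: r) = false := by
          simp only [List.isPrefixOf, Bool.and_eq_false_iff, beq_eq_false_iff_ne, ne_eq]
          by_cases h1 : c1 = '\n'
          · right; left; intro h2; exact hc ⟨h1, h2.symm⟩
          · left; intro h2; exact h1 h2.symm
        rw [PySem.Chars.splitOn.go.eq_def]
        simp only [hpf, Bool.false_eq_true, if_false]
        rw [ih (c2 :: r) (c1 :: cur) acc (by simp at h ⊢; omega)]
        simp [spSplit, hc]

theorem splitOn_eq_spSplit (cs : List Char) :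
    PySem.Chars.splitOn cs ['\n', '\n'] = spSplit [] cs := by
  have := go_eq_spSplit (cs.length + 1) cs [] [] (by omega)
  simpa [PySem.Chars.splitOn] using this

theorem spSplit_pre (cs : List Char) : ∀ pre : List Char,
    ∃ h t, spSplit [] cs = h :: t ∧ spSplit pre cs = (pre ++ h) :: t := by
  induction cs with
  | nil => intro pre; exact ⟨[], [], by simp [spSplit], by simp [spSplit]⟩
  | cons c1 rest ih =>
    intro pre
    cases rest with
    | nil => exact ⟨[c1], [], by simp [spSplit], by simp [spSplit]⟩
    | cons c2 r =>
      by_cases hc : c1 = '\n' ∧ c2 = '\n'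
      · exact ⟨[], spSplit [] r, by simp [spSplit, hc], by simp [spSplit, hc]⟩
      · obtain ⟨h, t, e1, e2⟩ := ih [c1]
        obtain ⟨h', t', e1', e2'⟩ := ih (pre ++ [c1])
        rw [e1] at e1'
        injection e1' with hh ht
        subst hh; subst ht
        refine ⟨c1 :: h, t, ?_, ?_⟩
        · simp only [spSplit, if_neg hc]; simpa using e2
        · simp only [spSplit, if_neg hc]; simpa using e2'

theorem chunkLoopA_shift (ps : List (List Char)) : ∀ (m : Int) (res : List Char),
    chunkLoopA m ps res = res ++ chunkLoopA (m - res.length) ps [] := by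
  induction ps with
  | nil => intro m res; simp [chunkLoopA]
  | cons p t ih =>
    intro m res
    simp only [chunkLoopA, PySem.Chars.len_eq, List.length_append, List.nil_append]
    by_cases hcond : m < (res.length : Int) + p.length
    · rw [if_pos (by exact_mod_cast hcond), if_pos (by push_cast; omega)]
      simp
    · rw [if_neg (by exact_mod_cast hcond), if_neg (by push_cast; omega)]
      rw [ih m (res ++ p ++ ['\n', '\n']), ih (m - res.length) (p ++ ['\n', '\n'])]
      simp only [List.length_append, List.append_assoc]
      congr 2
      push_cast
      ring_nf

-- the cut accumulator: 'cut = x; for p in seps: if p <= m: cut = p'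
def cutFold (m : Int) : Int → List Nat → Int
  | x, [] => x
  | x, p :: l => cutFold m (if (p : Int) ≤ m then (p : Int) else x) l

theorem foldl_eq_cutFold (m : Int) : ∀ (l : List Nat) (x : Int),
    l.foldl (fun c p => if (p : Int) ≤ m then (p : Int) else c) x = cutFold m x l := by
  intro l
  induction l with
  | nil => intro x; rfl
  | cons p l' ih => intro x; simp only [List.foldl_cons, cutFold]; exact ih _

theorem cutFold_cases (m : Int) : ∀ (l : List Nat) (x : Int),
    cutFold m x l = x ∨ ∃ p ∈ l, cutFold m x l = (p : Int) ∧ (p : Int) ≤ m := by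
  intro l
  induction l with
  | nil => intro x; left; rfl
  | cons p l' ih =>
    intro x
    by_cases hp : (p : Int) ≤ m
    · rcases ih (p : Int) with h | ⟨q, hq, h⟩
      · right; exact ⟨p, by simp, by simpa [cutFold, hp] using h, hp⟩
      · right; exact ⟨q, by simp [hq], by simpa [cutFold, hp] using h.1, h.2⟩
    · rcases ih x with h | ⟨q, hq, h⟩
      · left; simpa [cutFold, hp] using h
      · right; exact ⟨q, by simp [hq], by simpa [cutFold, hp] using h.1, h.2⟩

theorem cutFold_acc (m : Int) : ∀ (l : List Nat) (x : Int),
    cutFold m x l = if cutFold m (-1) l = -1 then x else cutFold m (-1) l := by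
  intro l
  induction l with
  | nil => intro x; simp [cutFold]
  | cons p l' ih =>
    intro x
    by_cases hp : (p : Int) ≤ m
    · have hne : cutFold m (p : Int) l' ≠ -1 := by
        rcases cutFold_cases m l' (p : Int) with h | ⟨q, _, h, _⟩ <;> rw [h] <;> omega
      simp only [cutFold, if_pos hp]
      rw [if_neg hne]
    · simp only [cutFold, if_neg hp]
      exact ih x

theorem cutFold_shift (m : Int) (d : Nat) : ∀ l : List Nat,
    cutFold m (-1) (l.map (· + d)) =
      if cutFold (m - d) (-1) l = -1 then -1 else cutFold (m - d) (-1) l + d := by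
  intro l
  induction l with
  | nil => simp [cutFold]
  | cons p l' ih =>
    by_cases hp : (p : Int) ≤ m - d
    · have hp' : ((p + d : Nat) : Int) ≤ m := by push_cast; omega
      have e1 : cutFold m (-1) ((p :: l').map (· + d))
          = cutFold m (((p + d : Nat) : Int)) (l'.map (· + d)) := by
        simp only [List.map_cons, cutFold, if_pos hp']
      have e2 : cutFold (m - d) (-1) (p :: l') = cutFold (m - d) ((p : Int)) l' := by
        simp [cutFold, hp]
      rcases eq_or_ne (cutFold (m - d) (-1) l') (-1) with h | h
      · have eL : cutFold m (((p + d : Nat) : Int)) (l'.map (· + d)) = ((p + d : Nat) : Int) := by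
          rw [cutFold_acc, ih, h]; simp
        have eR : cutFold (m - d) ((p : Int)) l' = (p : Int) := by
          rw [cutFold_acc, h]; simp
        rw [e1, eL, e2, eR, if_neg (by omega)]
        push_cast; ring
      · have hge : 0 ≤ cutFold (m - d) (-1) l' := by
          rcases cutFold_cases (m - d) l' (-1 : Int) with h' | ⟨q, _, h', _⟩
          · exact absurd h' h
          · rw [h']; positivity
        have eL : cutFold m (((p + d : Nat) : Int)) (l'.map (· + d))
            = cutFold (m - d) (-1) l' + d := by
          rw [cutFold_acc, ih, if_neg h, if_neg (by omega)]
        have eR : cutFold (m - d) ((p : Int)) l' = cutFold (m - d) (-1) l' := by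
          rw [cutFold_acc, if_neg h]
        rw [e1, eL, e2, eR, if_neg h]
    · have hp' : ¬ ((p + d : Nat) : Int) ≤ m := by push_cast; omega
      simp only [List.map_cons, cutFold, if_neg hp, if_neg hp']
      exact ih

theorem sepScanB_shift : ∀ (n : Nat) (cs : List Char), cs.length ≤ n → ∀ i : Nat,
    sepScanB cs i = (sepScanB cs 0).map (· + i) := by
  intro n
  induction n with
  | zero =>
    intro cs hlen i
    match cs with
    | [] => simp [sepScanB]
    | c :: r => simp at hlen
  | succ n ih =>
    intro cs hlen i
    match cs with
    | [] => simp [sepScanB]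
    | [c] => simp [sepScanB]
    | c1 :: c2 :: r =>
      by_cases hc : c1 = '\n' ∧ c2 = '\n'
      · simp only [sepScanB, if_pos hc]
        rw [ih r (by simp at hlen ⊢; omega) (i + 2), ih r (by simp at hlen ⊢; omega) 2]
        simp only [List.map_cons, List.map_map]
        refine List.cons_eq_cons.mpr ⟨by omega, ?_⟩
        exact List.map_congr_left (fun x _ => by simp only [Function.comp_def]; omega)
      · simp only [sepScanB, if_neg hc]
        rw [ih (c2 :: r) (by simp at hlen ⊢; omega) (i + 1), ih (c2 :: r) (by simp at hlen ⊢; omega) 1]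
        simp only [List.map_map]
        exact List.map_congr_left (fun x _ => by simp only [Function.comp_def]; omega)

theorem sepScanB_le : ∀ (n : Nat) (cs : List Char), cs.length ≤ n → ∀ (i p : Nat),
    p ∈ sepScanB cs i → p + 2 ≤ i + cs.length := by
  intro n
  induction n with
  | zero =>
    intro cs hlen i p hp
    match cs with
    | [] => simp [sepScanB] at hp
    | c :: r => simp at hlen
  | succ n ih =>
    intro cs hlen i p hp
    match cs with
    | [] => simp [sepScanB] at hp
    | [c] => simp [sepScanB] at hp
    | c1 :: c2 :: r =>
      by_cases hc : c1 = '\n' ∧ c2 = '\n'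
      · simp only [sepScanB, if_pos hc, List.mem_cons] at hp
        rcases hp with rfl | hp
        · simp
        · have := ih r (by simp at hlen ⊢; omega) (i + 2) p hp
          simp at this ⊢; omega
      · simp only [sepScanB, if_neg hc] at hp
        have := ih (c2 :: r) (by simp at hlen ⊢; omega) (i + 1) p hp
        simp at this ⊢; omega

theorem mainA : ∀ (n : Nat) (cs : List Char), cs.length ≤ n → ∀ m : Int, m < cs.length →
    chunkLoopA m (spSplit [] cs) [] =
      (if cutFold m (-1) (sepScanB cs 0) < 0 then []
       else cs.take (cutFold m (-1) (sepScanB cs 0)).toNat ++ ['\n', '\n']) := by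
  intro n
  induction n with
  | zero =>
    intro cs hlen m hm
    match cs with
    | [] =>
      have h0 : m < (0 : Int) := by simpa using hm
      simp [spSplit, chunkLoopA, sepScanB, cutFold, PySem.Chars.len_eq, h0]
    | c :: r => simp at hlen
  | succ n ih =>
    intro cs hlen m hm
    match cs with
    | [] =>
      have h0 : m < (0 : Int) := by simpa using hm
      simp [spSplit, chunkLoopA, sepScanB, cutFold, PySem.Chars.len_eq, h0]
    | [c] =>
      have h1 : m < (1 : Int) := by simpa using hm
      simp [spSplit, chunkLoopA, sepScanB, cutFold, PySem.Chars.len_eq, h1]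
    | c1 :: c2 :: r =>
      by_cases hc : c1 = '\n' ∧ c2 = '\n'
      · obtain ⟨h1, h2⟩ := hc; subst h1; subst h2
        have hsp : spSplit [] ('\n' :: '\n' :: r) = [] :: spSplit [] r := by
          simp [spSplit]
        have hsep : sepScanB ('\n' :: '\n' :: r) 0 = 0 :: (sepScanB r 0).map (· + 2) := by
          simp only [sepScanB, sepScanB_shift r.length r le_rfl 2]
          simp
        rw [hsp, hsep]
        by_cases hm0 : m < 0
        · have hcut : cutFold m (-1) (0 :: (sepScanB r 0).map (· + 2)) = -1 := by
            rcases cutFold_cases m (0 :: (sepScanB r 0).map (· + 2)) (-1) with h | ⟨q, _, h, hle⟩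
            · exact h
            · exfalso; omega
          rw [hcut]
          simp only [chunkLoopA, PySem.Chars.len_eq, List.append_nil, List.length_nil,
            Nat.cast_zero]
          rw [if_pos (by simpa using hm0)]
          norm_num
        · push_neg at hm0
          have hshift := cutFold_shift m 2 (sepScanB r 0)
          have hcast : ((2 : Nat) : Int) = 2 := by norm_num
          rw [hcast] at hshift
          have hstep : cutFold m (-1) (0 :: (sepScanB r 0).map (· + 2))
              = cutFold m 0 ((sepScanB r 0).map (· + 2)) := by
            simp [cutFold, hm0]
          have hA : chunkLoopA m ([] :: spSplit [] r) []
              = ['\n', '\n'] ++ chunkLoopA (m - 2) (spSplit [] r) [] := by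
            simp only [chunkLoopA, PySem.Chars.len_eq, List.append_nil, List.length_nil,
              Nat.cast_zero]
            rw [if_neg (by omega)]
            rw [chunkLoopA_shift]
            norm_num
          have hIH := ih r (by simp at hlen ⊢; omega) (m - 2) (by simp at hm ⊢; omega)
          rcases cutFold_cases (m - 2) (sepScanB r 0) (-1) with h | ⟨p, hpmem, h, hple⟩
          · rw [hstep, cutFold_acc, hshift, h]
            simp only [if_pos rfl]
            rw [hA, hIH, h]
            norm_num
          · have hp0 : (0 : Int) ≤ cutFold (m - 2) (-1) (sepScanB r 0) := by rw [h]; positivity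
            rw [hstep, cutFold_acc, hshift, if_neg (by omega)]
            rw [if_neg (by omega), if_neg (by omega)]
            rw [hA, hIH, if_neg (by omega)]
            have htn : (cutFold (m - 2) (-1) (sepScanB r 0) + 2).toNat
                = (cutFold (m - 2) (-1) (sepScanB r 0)).toNat + 2 := by omega
            rw [htn]
            rw [show (cutFold (m-2) (-1) (sepScanB r 0)).toNat + 2
                  = ((cutFold (m-2) (-1) (sepScanB r 0)).toNat + 1) + 1 by omega]
            simp [List.take_succ_cons]
      · obtain ⟨hd, t, e1, e2⟩ := spSplit_pre (c2 :: r) [c1]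
        have hsp : spSplit [] (c1 :: c2 :: r) = (c1 :: hd) :: t := by
          simp only [spSplit, if_neg hc, List.nil_append]
          simpa using e2
        have hsep : sepScanB (c1 :: c2 :: r) 0 = (sepScanB (c2 :: r) 0).map (· + 1) := by
          simp only [sepScanB, if_neg hc]
          exact sepScanB_shift (c2 :: r).length (c2 :: r) le_rfl 1
        have hshift := cutFold_shift m 1 (sepScanB (c2 :: r) 0)
        have hcast : ((1 : Nat) : Int) = 1 := by norm_num
        rw [hcast] at hshift
        have hIH := ih (c2 :: r) (by simp at hlen ⊢; omega) (m - 1) (by simp at hm ⊢; omega)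
        rw [e1] at hIH
        rw [hsp, hsep, hshift]
        by_cases hmm : m < (hd.length : Int) + 1
        · have hA : chunkLoopA m ((c1 :: hd) :: t) [] = [] := by
            simp only [chunkLoopA, PySem.Chars.len_eq, List.nil_append, List.length_cons]
            rw [if_pos (by push_cast; omega)]
          have hA' : chunkLoopA (m - 1) (hd :: t) [] = [] := by
            simp only [chunkLoopA, PySem.Chars.len_eq, List.nil_append]
            rw [if_pos (by omega)]
          rw [hA' ] at hIH
          rcases cutFold_cases (m - 1) (sepScanB (c2 :: r) 0) (-1) with h | ⟨p, hpmem, h, hple⟩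
          · rw [hA, h]; simp
          · rw [h] at hIH
            rw [if_neg (by omega)] at hIH
            exact absurd hIH.symm (by simp)
        · have hA : chunkLoopA m ((c1 :: hd) :: t) []
              = c1 :: chunkLoopA (m - 1) (hd :: t) [] := by
            simp only [chunkLoopA, PySem.Chars.len_eq, List.nil_append, List.length_cons]
            rw [if_neg (by push_cast; omega), if_neg (by omega)]
            rw [chunkLoopA_shift t m, chunkLoopA_shift t (m - 1)]
            simp only [List.length_append, List.length_cons, List.cons_append,
              List.nil_append]
            have harg : ∀ X Y : Int, X = Y →
                c1 :: (hd ++ ['\n', '\n'] ++ chunkLoopA X t [])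
                  = c1 :: (hd ++ ['\n', '\n'] ++ chunkLoopA Y t []) := by
              intro X Y h; rw [h]
            apply harg
            push_cast
            ring
          rcases cutFold_cases (m - 1) (sepScanB (c2 :: r) 0) (-1) with h | ⟨p, hpmem, h, hple⟩
          · rw [h] at hIH
            rw [if_pos (by norm_num)] at hIH
            have : chunkLoopA (m - 1) (hd :: t) [] ≠ [] := by
              simp only [chunkLoopA, PySem.Chars.len_eq, List.nil_append]
              rw [if_neg (by omega)]
              rw [chunkLoopA_shift]
              simp
            exact absurd hIH this
          · have hp0 : (0 : Int) ≤ cutFold (m - 1) (-1) (sepScanB (c2 :: r) 0) := by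
              rw [h]; positivity
            rw [if_neg (by omega), if_neg (by omega)]
            rw [hA, hIH, if_neg (by omega)]
            have htn : (cutFold (m - 1) (-1) (sepScanB (c2 :: r) 0) + 1).toNat
                = (cutFold (m - 1) (-1) (sepScanB (c2 :: r) 0)).toNat + 1 := by omega
            rw [htn]
            simp [List.take_succ_cons]

-- ===== VERDICT (by name: the statement is the Claim_ definition above) =====
theorem smart_chunk_content_py_spec : Claim_equal_smart_chunk_content_py := by
  intro content max_chunk _
  unfold Spec_smart_chunk_content_py smart_chunk_content_py smart_chunk_content_py_alt
  by_cases h0 : PySem.Chars.len content.toList ≤ max_chunk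
  · simp only [h0, if_pos]
  · simp only [h0, if_false]
    rw [foldl_eq_cutFold, splitOn_eq_spSplit]
    have hm : max_chunk < (content.toList.length : Int) := by
      simp only [PySem.Chars.len_eq] at h0; omega
    rw [mainA content.toList.length content.toList le_rfl max_chunk hm]
    rcases cutFold_cases max_chunk (sepScanB content.toList 0) (-1) with h | ⟨p, hpmem, h, hple⟩
    · rw [h]
      norm_num [PySem.Chars.len_eq]
    · have h2 : p + 2 ≤ content.toList.length := by
        simpa using sepScanB_le content.toList.length content.toList le_rfl 0 p hpmem
      rw [h]
      have hnp : ¬ ((p : Nat) : Int) < 0 := by omega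
      simp only [if_neg hnp]
      have hslice : PySem.Chars.slice content.toList none (some ((p : Nat) : Int))
          = List.take (((p : Nat) : Int)).toNat content.toList := by
        rw [PySem.Chars.slice_eq_listSlice, PySem.List.slice_to _ (Int.natCast_nonneg p)]
      rw [hslice]
      have hlen : PySem.Chars.len (List.take ((p : Int)).toNat content.toList ++ ['\n', '\n'])
          = p + 2 := by
        simp only [PySem.Chars.len_eq, List.length_append, List.length_take,
          Int.toNat_natCast, List.length_cons, List.length_nil]
        omega
      rw [hlen]
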